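-- pv_equiv track=rewrite | github.com/albertnanda19/Dev-Memory | bot.py | _clean_commit_message
-- ===== SOURCE A (Python) =====
-- def _clean_commit_message(msg: str) -> str:
--     s = (msg or "").strip()
--     low = s.lower()
--     prefixes = ["feat:", "fix:", "refactor:", "test:", "chore:", "perf:", "ci:"]
--     for p in prefixes:
--         if low.startswith(p):
--             return s[len(p) :].strip()
--     return s
-- ===== SOURCE B (Python) =====
-- _TYPES = {"feat", "fix", "refactor", "test", "chore", "perf", "ci"}
--
-- def _clean_commit_message(msg: str) -> str:
--     s = (msg or "").strip()
--     head, sep, rest = s.partition(":")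
--     if sep and head.lower() in _TYPES:
--         return rest.strip()
--     return s
-- ===== Notes on version B (the rewrite author's own statement) =====
-- stated objective: simpler
-- what changed: Replaces the scan over the seven conventional-commit prefixes (startswith on the lowered whole string) by a single partition at the first colon plus one set-membership test of the lowered head.
import Mathlib
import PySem

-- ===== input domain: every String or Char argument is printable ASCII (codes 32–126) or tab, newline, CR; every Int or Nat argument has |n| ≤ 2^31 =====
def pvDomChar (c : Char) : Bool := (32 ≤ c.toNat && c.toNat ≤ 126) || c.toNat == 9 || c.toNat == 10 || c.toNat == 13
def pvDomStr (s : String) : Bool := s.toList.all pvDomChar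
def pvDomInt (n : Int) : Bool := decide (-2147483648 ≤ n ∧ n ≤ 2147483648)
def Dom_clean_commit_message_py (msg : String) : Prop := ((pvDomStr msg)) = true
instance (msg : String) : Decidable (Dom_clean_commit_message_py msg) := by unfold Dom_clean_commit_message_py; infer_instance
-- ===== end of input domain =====

-- B replaces A's scan over the seven conventional-commit prefixes by one partition at the first colon
-- plus a single membership test of the lowered head (objective: simpler; same cost).

-- ===== PORT A =====
-- the for-loop over `prefixes`: first prefix of `low` wins, returns s[len(p):].strip()
def pvCleanLoop (s low : List Char) : List (List Char) → List Char
  | [] => s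
  | p :: ps =>
    if PySem.Chars.startswith low p then
      PySem.Chars.strip (PySem.Chars.slice s (some (p.length : Int)) none)
    else pvCleanLoop s low ps

def pvPrefixes : List (List Char) :=
  ["feat:".toList, "fix:".toList, "refactor:".toList, "test:".toList,
   "chore:".toList, "perf:".toList, "ci:".toList]

def clean_commit_message_py (msg : String) : String :=
  let s := PySem.Chars.strip msg.toList          -- s = (msg or "").strip()  ((msg or "") = msg for str input)
  let low := PySem.Chars.lower s                 -- low = s.lower()
  String.ofList (pvCleanLoop s low pvPrefixes)

-- ===== PORT B =====
def pvTypes : List (List Char) :=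
  ["feat".toList, "fix".toList, "refactor".toList, "test".toList,
   "chore".toList, "perf".toList, "ci".toList]

def clean_commit_message_py_alt (msg : String) : String :=
  let s := PySem.Chars.strip msg.toList                    -- s = (msg or "").strip()
  let head := s.takeWhile (· != ':')                       -- head, sep, rest = s.partition(":")
  match s.dropWhile (· != ':') with
  | [] => String.ofList s                                  -- not sep
  | _ :: rest =>
    if pvTypes.contains (PySem.Chars.lower head) then      -- head.lower() in _TYPES
      String.ofList (PySem.Chars.strip rest)               -- rest.strip()
    else String.ofList s

-- ===== PRECONDITION & SPEC =====
def Spec_clean_commit_message_py (msg : String) (out : String) : Prop := out = clean_commit_message_py_alt msg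
instance (msg : String) (out : String) : Decidable (Spec_clean_commit_message_py msg out) := by unfold Spec_clean_commit_message_py; infer_instance

-- ===== CLAIM (what is proved, stated in full; the proofs are below) =====
def Claim_equal_clean_commit_message_py : Prop := ∀ (msg : String), Dom_clean_commit_message_py msg → Spec_clean_commit_message_py msg (clean_commit_message_py msg)

-- ===== LEMMAS AND PROOFS =====

theorem char_toNat_ofNat (n : Nat) (h : n < 0xd800) : (Char.ofNat n).toNat = n := by
  have hv : n.isValidChar := Or.inl h
  rw [Char.ofNat, dif_pos hv]
  simp [Char.toNat, Char.ofNatAux]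

-- lowercasing never creates or destroys a colon
theorem lowerChar_eq_colon (c : Char) : (PySem.Chars.lowerChar c = ':') ↔ c = ':' := by
  have hcol : (':' : Char).toNat = 58 := rfl
  unfold PySem.Chars.lowerChar PySem.Chars.isupper
  split_ifs with h
  · simp only [Bool.and_eq_true, decide_eq_true_eq, Char.le_def] at h
    have h1 : 65 ≤ c.toNat := UInt32.le_iff_toNat_le.mp h.1
    have h2 : c.toNat ≤ 90 := UInt32.le_iff_toNat_le.mp h.2
    constructor <;> intro hc <;> exfalso
    · have := congrArg Char.toNat hc
      rw [char_toNat_ofNat _ (by omega), hcol] at this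
      omega
    · have := congrArg Char.toNat hc
      rw [hcol] at this
      omega
  · rfl

theorem takeWhile_colon (w x : List Char) (hw : ∀ c ∈ w, (c != ':') = true) :
    (w ++ ':' :: x).takeWhile (· != ':') = w := by
  induction w with
  | nil => simp
  | cons a as ih =>
    simp only [List.cons_append, List.takeWhile_cons]
    rw [hw a (by simp), ih (fun c hc => hw c (by simp [hc]))]
    simp

theorem dropWhile_cons_pred {α : Type} (p : α → Bool) (l t : List α) (c : α)
    (h : l.dropWhile p = c :: t) : p c = false := by
  induction l with
  | nil => simp at h
  | cons a as ih =>
    rw [List.dropWhile_cons] at h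
    by_cases hp : p a
    · simp [hp] at h; exact ih h
    · simp [hp] at h; rw [h.1] at hp; simpa using hp

theorem lower_no_colon (w : List Char) (hw : ∀ c ∈ w, (c != ':') = true) :
    ∀ c ∈ PySem.Chars.lower w, (c != ':') = true := by
  intro c hc
  simp only [PySem.Chars.lower, List.mem_map] at hc
  obtain ⟨a, ha, rfl⟩ := hc
  have := hw a ha
  simp only [bne_iff_ne, ne_eq] at this ⊢
  exact fun h => this ((lowerChar_eq_colon a).mp h)

theorem length_lower (w : List Char) : (PySem.Chars.lower w).length = w.length := by
  simp [PySem.Chars.lower]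

-- startswith on the lowered string, for a prefix "w:" with no colon inside w,
-- is exactly "the lowered part before the first colon equals w"
theorem startswith_key (hh rest w : List Char)
    (hhh : ∀ c ∈ hh, (c != ':') = true) (hw : ∀ c ∈ w, (c != ':') = true) :
    (PySem.Chars.startswith (PySem.Chars.lower (hh ++ ':' :: rest)) (w ++ [':']) = true)
      ↔ PySem.Chars.lower hh = w := by
  have hls : PySem.Chars.lower (hh ++ ':' :: rest)
      = PySem.Chars.lower hh ++ ':' :: PySem.Chars.lower rest := by
    simp [PySem.Chars.lower, PySem.Chars.lowerChar, PySem.Chars.isupper]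
  rw [PySem.Chars.startswith_iff, hls]
  constructor
  · rintro ⟨t, ht⟩
    have h1 := takeWhile_colon (PySem.Chars.lower hh) (PySem.Chars.lower rest) (lower_no_colon hh hhh)
    rw [← ht] at h1
    simp only [List.append_assoc, List.singleton_append] at h1
    rw [takeWhile_colon w t hw] at h1
    exact h1.symm
  · intro h
    exact ⟨PySem.Chars.lower rest, by rw [← h]; simp⟩

-- s[len(p):] for p = "w:" on s = hh ++ ':' :: rest with |hh| + 1 = len(p)
theorem slice_colon (hh rest : List Char) (n : Int) (hn : n = (hh.length : Int) + 1) :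
    PySem.List.slice (hh ++ ':' :: rest) (some n) none = rest := by
  rw [PySem.List.slice_from _ (by omega)]
  have : n.toNat = (hh ++ [':']).length := by simp; omega
  rw [this, show hh ++ ':' :: rest = (hh ++ [':']) ++ rest by simp, List.drop_left]

-- A's loop when s contains no colon: no prefix can match
theorem main_nil (s : List Char) (hs : ∀ c ∈ s, (c != ':') = true) :
    pvCleanLoop s (PySem.Chars.lower s) pvPrefixes = s := by
  have hnc := lower_no_colon s hs
  have nostart : ∀ p : List Char, ':' ∈ p →
      PySem.Chars.startswith (PySem.Chars.lower s) p = false := by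
    intro p hp
    by_contra hb
    rw [Bool.not_eq_false, PySem.Chars.startswith_iff] at hb
    have : ':' ∈ PySem.Chars.lower s := hb.mem hp
    simpa using hnc ':' this
  simp [pvCleanLoop, pvPrefixes,
    nostart ['f','e','a','t',':'] (by decide), nostart ['f','i','x',':'] (by decide),
    nostart ['r','e','f','a','c','t','o','r',':'] (by decide), nostart ['t','e','s','t',':'] (by decide),
    nostart ['c','h','o','r','e',':'] (by decide), nostart ['p','e','r','f',':'] (by decide),
    nostart ['c','i',':'] (by decide)]

-- A's loop on s = hh ++ ':' :: rest equals B's membership test on lower hh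
set_option maxRecDepth 4096 in
theorem main_cons (hh rest : List Char) (hhh : ∀ c ∈ hh, (c != ':') = true) :
    pvCleanLoop (hh ++ ':' :: rest) (PySem.Chars.lower (hh ++ ':' :: rest)) pvPrefixes =
      (if pvTypes.contains (PySem.Chars.lower hh) then PySem.Chars.strip rest
       else hh ++ ':' :: rest) := by
  have k := fun (w : List Char) (hw : ∀ c ∈ w, (c != ':') = true) =>
    startswith_key hh rest w hhh hw
  have k1 : (PySem.Chars.startswith (PySem.Chars.lower (hh ++ ':' :: rest)) ['f','e','a','t',':'] = true)
      ↔ PySem.Chars.lower hh = ['f','e','a','t'] := by simpa using k ['f','e','a','t'] (by simp)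
  have k2 : (PySem.Chars.startswith (PySem.Chars.lower (hh ++ ':' :: rest)) ['f','i','x',':'] = true)
      ↔ PySem.Chars.lower hh = ['f','i','x'] := by simpa using k ['f','i','x'] (by simp)
  have k3 : (PySem.Chars.startswith (PySem.Chars.lower (hh ++ ':' :: rest)) ['r','e','f','a','c','t','o','r',':'] = true)
      ↔ PySem.Chars.lower hh = ['r','e','f','a','c','t','o','r'] := by
    simpa using k ['r','e','f','a','c','t','o','r'] (by simp)
  have k4 : (PySem.Chars.startswith (PySem.Chars.lower (hh ++ ':' :: rest)) ['t','e','s','t',':'] = true)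
      ↔ PySem.Chars.lower hh = ['t','e','s','t'] := by simpa using k ['t','e','s','t'] (by simp)
  have k5 : (PySem.Chars.startswith (PySem.Chars.lower (hh ++ ':' :: rest)) ['c','h','o','r','e',':'] = true)
      ↔ PySem.Chars.lower hh = ['c','h','o','r','e'] := by simpa using k ['c','h','o','r','e'] (by simp)
  have k6 : (PySem.Chars.startswith (PySem.Chars.lower (hh ++ ':' :: rest)) ['p','e','r','f',':'] = true)
      ↔ PySem.Chars.lower hh = ['p','e','r','f'] := by simpa using k ['p','e','r','f'] (by simp)
  have k7 : (PySem.Chars.startswith (PySem.Chars.lower (hh ++ ':' :: rest)) ['c','i',':'] = true)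
      ↔ PySem.Chars.lower hh = ['c','i'] := by simpa using k ['c','i'] (by simp)
  simp [pvCleanLoop, pvPrefixes]
  by_cases h1 : PySem.Chars.lower hh = ['f','e','a','t']
  · rw [if_pos (k1.mpr h1), slice_colon hh rest 5 (by
          have hl := congrArg List.length h1
          rw [length_lower] at hl
          simp at hl
          omega),
        if_pos (by rw [h1]; decide)]
  rw [if_neg (fun hx => h1 (k1.mp hx))]
  by_cases h2 : PySem.Chars.lower hh = ['f','i','x']
  · rw [if_pos (k2.mpr h2), slice_colon hh rest 4 (by
          have hl := congrArg List.length h2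
          rw [length_lower] at hl
          simp at hl
          omega),
        if_pos (by rw [h2]; decide)]
  rw [if_neg (fun hx => h2 (k2.mp hx))]
  by_cases h3 : PySem.Chars.lower hh = ['r','e','f','a','c','t','o','r']
  · rw [if_pos (k3.mpr h3), slice_colon hh rest 9 (by
          have hl := congrArg List.length h3
          rw [length_lower] at hl
          simp at hl
          omega),
        if_pos (by rw [h3]; decide)]
  rw [if_neg (fun hx => h3 (k3.mp hx))]
  by_cases h4 : PySem.Chars.lower hh = ['t','e','s','t']
  · rw [if_pos (k4.mpr h4), slice_colon hh rest 5 (by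
          have hl := congrArg List.length h4
          rw [length_lower] at hl
          simp at hl
          omega),
        if_pos (by rw [h4]; decide)]
  rw [if_neg (fun hx => h4 (k4.mp hx))]
  by_cases h5 : PySem.Chars.lower hh = ['c','h','o','r','e']
  · rw [if_pos (k5.mpr h5), slice_colon hh rest 6 (by
          have hl := congrArg List.length h5
          rw [length_lower] at hl
          simp at hl
          omega),
        if_pos (by rw [h5]; decide)]
  rw [if_neg (fun hx => h5 (k5.mp hx))]
  by_cases h6 : PySem.Chars.lower hh = ['p','e','r','f']
  · rw [if_pos (k6.mpr h6), slice_colon hh rest 5 (by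
          have hl := congrArg List.length h6
          rw [length_lower] at hl
          simp at hl
          omega),
        if_pos (by rw [h6]; decide)]
  rw [if_neg (fun hx => h6 (k6.mp hx))]
  by_cases h7 : PySem.Chars.lower hh = ['c','i']
  · rw [if_pos (k7.mpr h7), slice_colon hh rest 3 (by
          have hl := congrArg List.length h7
          rw [length_lower] at hl
          simp at hl
          omega),
        if_pos (by rw [h7]; decide)]
  rw [if_neg (fun hx => h7 (k7.mp hx)),
      if_neg (by simp [pvTypes, h1, h2, h3, h4, h5, h6, h7])]

-- the heart: A's prefix loop equals B's partition test, for every list of chars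
theorem main_list (s : List Char) :
    pvCleanLoop s (PySem.Chars.lower s) pvPrefixes =
      (match s.dropWhile (· != ':') with
       | [] => s
       | _ :: rest =>
         if pvTypes.contains (PySem.Chars.lower (s.takeWhile (· != ':'))) then
           PySem.Chars.strip rest
         else s) := by
  have hsplit := (List.takeWhile_append_dropWhile (p := (· != ':')) (l := s)).symm
  have hhh : ∀ c ∈ s.takeWhile (· != ':'), (c != ':') = true :=
    fun c hc => List.mem_takeWhile_imp (p := fun x => x != ':') hc
  cases hd : s.dropWhile (· != ':') with
  | nil =>
    exact main_nil s (List.dropWhile_eq_nil_iff.mp hd)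
  | cons c rest =>
    have hc : c = ':' := by
      have := dropWhile_cons_pred _ _ _ _ hd
      simpa using this
    subst hc
    have hs : s = s.takeWhile (· != ':') ++ ':' :: rest := by
      conv_lhs => rw [hsplit, hd]
    show pvCleanLoop s (PySem.Chars.lower s) pvPrefixes =
      if pvTypes.contains (PySem.Chars.lower (s.takeWhile (· != ':'))) then
        PySem.Chars.strip rest
      else s
    conv_lhs => rw [hs]
    rw [main_cons _ rest hhh, ← hs]

-- ===== VERDICT (by name: the statement is the Claim_ definition above) =====
theorem clean_commit_message_py_spec : Claim_equal_clean_commit_message_py := by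
  intro msg _
  unfold Spec_clean_commit_message_py clean_commit_message_py clean_commit_message_py_alt
  simp only [main_list]
  cases List.dropWhile (fun x => x != ':') (PySem.Chars.strip msg.toList) with
  | nil => rfl
  | cons c rest => split_ifs <;> rfl
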